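-- pv_equiv track=rewrite | github.com/CNuge/CamBioPy | src/cambiopy/ped_encode.py | get_unique_alleles
-- ===== SOURCE A (Python) =====
-- def get_unique_alleles(gt_count_dict):
--     """Determine the major and minor alleles for the given marker."""
--     unique_alleles = {}
--     for x in gt_count_dict.keys():
--         for a in x.split(" "):
--             if a in unique_alleles.keys():
--                 unique_alleles[a] = unique_alleles[a] + gt_count_dict[x]
--             else:
--                 unique_alleles[a] = gt_count_dict[x]
--     if len(unique_alleles) > 2:
--         raise ValueError("SNP is not biallelic")
--     if len(unique_alleles) == 1:
--         raise ValueError("SNP is homozygous")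
--     k1, k2 = unique_alleles.keys()
--     if unique_alleles[k1] >= unique_alleles[k2]:
--         return k1, k2
--     else:
--         return k2, k1
-- ===== SOURCE B (Python) =====
-- def get_unique_alleles(gt_count_dict):
--     """Determine the major and minor alleles for the given marker."""
--     alleles = []
--     for key in gt_count_dict:
--         for a in key.split(" "):
--             if a not in alleles:
--                 alleles.append(a)
--     if len(alleles) > 2:
--         raise ValueError("SNP is not biallelic")
--     if len(alleles) == 1:
--         raise ValueError("SNP is homozygous")
--     counts = [sum(n * key.split(" ").count(a) for key, n in gt_count_dict.items())
--               for a in alleles]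
--     if counts[0] >= counts[1]:
--         return alleles[0], alleles[1]
--     return alleles[1], alleles[0]
-- ===== Notes on version B (the rewrite author's own statement) =====
-- stated objective: alternative
-- what changed: A accumulates per-allele totals in a single dict-building pass with repeated dict lookups/updates; B first indexes the distinct alleles in first-seen order, then computes each allele's total in a separate weighted-count pass over the genotype items, with the same biallelic validation and >=-tie-break.
import Mathlib
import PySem

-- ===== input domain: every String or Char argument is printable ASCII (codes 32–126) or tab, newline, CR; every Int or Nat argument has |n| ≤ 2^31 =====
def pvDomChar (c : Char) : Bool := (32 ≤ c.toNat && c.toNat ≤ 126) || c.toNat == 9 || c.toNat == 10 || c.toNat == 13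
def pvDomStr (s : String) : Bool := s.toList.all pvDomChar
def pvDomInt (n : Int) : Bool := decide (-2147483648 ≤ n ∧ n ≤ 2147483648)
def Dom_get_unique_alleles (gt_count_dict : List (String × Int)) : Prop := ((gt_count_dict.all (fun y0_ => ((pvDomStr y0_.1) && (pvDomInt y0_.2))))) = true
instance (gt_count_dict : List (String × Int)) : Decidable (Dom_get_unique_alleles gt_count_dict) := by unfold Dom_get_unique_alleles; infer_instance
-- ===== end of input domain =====

-- B replaces A's single dict-accumulation pass by an index-then-rescan decomposition
-- (first collect distinct alleles in first-seen order, then total each allele in a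
-- separate weighted-count pass); objective: alternative structure, same cost.

-- ===== PORT A =====
-- x.split(" "): separator " " is non-empty, so Python's split never raises; split? is some here
def pvSplitA (s : String) : List String := (PySem.Str.split? s " ").getD []

def get_unique_alleles (gt_count_dict : List (String × Int)) : String × String :=
  let g : PySem.Dict String Int := PySem.Dict.mk gt_count_dict
  let ua : PySem.Dict String Int := gt_count_dict.foldl (fun ua p =>
      (pvSplitA p.1).foldl (fun ua a =>
        if ua.contains a then ua.insert a (ua.getD a 0 + g.getD p.1 0)
        else ua.insert a (g.getD p.1 0)) ua) PySem.Dict.empty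
  if ua.size > 2 then ("", "")        -- raise ValueError "SNP is not biallelic"
  else if ua.size = 1 then ("", "")   -- raise ValueError "SNP is homozygous"
  else match ua.keys with
    | [k1, k2] => if ua.getD k1 0 ≥ ua.getD k2 0 then (k1, k2) else (k2, k1)
    | _ => ("", "")                   -- 'k1, k2 = …' unpack raises ValueError (empty dict)

-- ===== PORT B =====
-- key.split(" ") on B's side (same non-empty separator, so total)
def pvSplitB (s : String) : List String := (PySem.Str.split? s " ").getD []

-- sum(n * key.split(" ").count(a) for key, n in gt_count_dict.items())
def pvTotal (gt_count_dict : List (String × Int)) (a : String) : Int :=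
  gt_count_dict.foldl
    (fun s p => s + p.2 * ((PySem.List.count (pvSplitB p.1) a : Nat) : Int)) 0

def get_unique_alleles_alt (gt_count_dict : List (String × Int)) : String × String :=
  let alleles : PySem.Set String := gt_count_dict.foldl (fun ks p =>
      (pvSplitB p.1).foldl (fun ks a => PySem.Set.add ks a) ks) []
  if alleles.length > 2 then ("", "")       -- raise ValueError "SNP is not biallelic"
  else if alleles.length = 1 then ("", "")  -- raise ValueError "SNP is homozygous"
  else
    -- counts[0] / alleles[1] …: IndexError only for the empty allele list, which Pre_ excludes
    let counts := alleles.map (pvTotal gt_count_dict)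
    if PySem.List.pyGetD counts 0 0 ≥ PySem.List.pyGetD counts 1 0 then
      (PySem.List.pyGetD alleles 0 "", PySem.List.pyGetD alleles 1 "")
    else (PySem.List.pyGetD alleles 1 "", PySem.List.pyGetD alleles 0 "")

-- ===== PRECONDITION & SPEC =====
-- Pre_ requires (i) pairwise-distinct keys — the association list encodes a Python dict,
-- whose keys are necessarily unique, so duplicate-key lists do not represent a reachable
-- input — and (ii) exactly two distinct alleles over all keys: with any other number A
-- raises ValueError ("not biallelic" / "homozygous" / tuple-unpack on the empty dict).
def Pre_get_unique_alleles (gt_count_dict : List (String × Int)) : Prop :=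
  (gt_count_dict.map Prod.fst).Nodup ∧
  (PySem.Set.ofList (gt_count_dict.flatMap (fun p => (PySem.Str.split? p.1 " ").getD []))).length = 2
instance (gt_count_dict : List (String × Int)) : Decidable (Pre_get_unique_alleles gt_count_dict) := by
  unfold Pre_get_unique_alleles; infer_instance

def pvWitness_get_unique_alleles : (List (String × Int)) := [("A A", 3), ("A G", 2), ("G G", 1)]

def Spec_get_unique_alleles (gt_count_dict : List (String × Int)) (out : String × String) : Prop := out = get_unique_alleles_alt gt_count_dict
instance (gt_count_dict : List (String × Int)) (out : String × String) : Decidable (Spec_get_unique_alleles gt_count_dict out) := by unfold Spec_get_unique_alleles; infer_instance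

-- ===== CLAIM (what is proved, stated in full; the proofs are below) =====
def Claim_equal_get_unique_alleles : Prop := ∀ (gt_count_dict : List (String × Int)), Dom_get_unique_alleles gt_count_dict → Pre_get_unique_alleles gt_count_dict → Spec_get_unique_alleles gt_count_dict (get_unique_alleles gt_count_dict)

-- ===== LEMMAS AND PROOFS =====

-- the weighted sum both programs compute for one allele
def pvSum (g : List (String × Int)) (a : String) : Int :=
  (g.map (fun p => p.2 * ((PySem.List.count (pvSplitB p.1) a : Nat) : Int))).sum

theorem pvTotal_eq_pvSum (g : List (String × Int)) (a : String) :
    pvTotal g a = pvSum g a := by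
  unfold pvTotal pvSum
  rw [PySem.List.foldl_add]
  simp

-- nested fold over sublists = fold over the flattened list
theorem foldl_nest_flatMap {α β γ : Type} (f : α → List β) (step : γ → β → γ)
    (l : List α) (init : γ) :
    l.foldl (fun s p => (f p).foldl step s) init = (l.flatMap f).foldl step init := by
  induction l generalizing init with
  | nil => rfl
  | cons p t ih => simp [List.flatMap_cons, List.foldl_append, ih]

-- B's allele list is set(flattened alleles)
theorem alt_alleles_eq (g : List (String × Int)) :
    g.foldl (fun ks p => (pvSplitB p.1).foldl (fun ks a => PySem.Set.add ks a) ks)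
      ([] : PySem.Set String)
    = PySem.Set.ofList (g.flatMap (fun p => pvSplitB p.1)) := by
  rw [foldl_nest_flatMap]
  rfl

-- A's inner accumulation step collapses to a single insert form
theorem stepA_collapse (v : Int) :
    (fun (ua : PySem.Dict String Int) (a : String) =>
        if ua.contains a then ua.insert a (ua.getD a 0 + v) else ua.insert a v)
    = (fun ua a => ua.insert a (ua.getD a 0 + v)) := by
  funext ua a
  by_cases h : ua.contains a = true
  · simp [h]
  · simp only [Bool.not_eq_true] at h
    rw [h, PySem.Dict.getD_of_not_contains ua (0 : Int) h, zero_add]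
    simp

-- one key's inner loop: getD after folding one split list
theorem getD_inner (l : List String) (v : Int) (d : PySem.Dict String Int) (a : String) :
    (l.foldl (fun ua x => ua.insert x (ua.getD x 0 + v)) d).getD a 0
      = d.getD a 0 + v * (l.count a : Int) := by
  induction l generalizing d with
  | nil => simp
  | cons x t ih =>
    rw [List.foldl_cons, ih, PySem.Dict.getD_insert, List.count_cons]
    by_cases hxa : a = x
    · subst hxa; simp; ring
    · have : ¬ (x = a) := fun h => hxa h.symm
      simp [hxa, this]

theorem keys_inner (l : List String) (v : Int) (d : PySem.Dict String Int) :
    (l.foldl (fun ua x => ua.insert x (ua.getD x 0 + v)) d).keys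
      = l.foldl (fun ks a => PySem.Set.add ks a) d.keys := by
  rw [PySem.Dict.keys_foldl_insert]
  rfl

-- A's whole accumulation, rewritten with each key's own value p.2
def pvAcc (g : List (String × Int)) (d : PySem.Dict String Int) : PySem.Dict String Int :=
  g.foldl (fun ua p =>
    (pvSplitB p.1).foldl (fun ua a => ua.insert a (ua.getD a 0 + p.2)) ua) d

theorem getD_pvAcc (g : List (String × Int)) (d : PySem.Dict String Int) (a : String) :
    (pvAcc g d).getD a 0 = d.getD a 0 + pvSum g a := by
  induction g generalizing d with
  | nil => simp [pvAcc, pvSum]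
  | cons p t ih =>
    unfold pvAcc at *
    rw [List.foldl_cons, ih, getD_inner]
    unfold pvSum
    rw [List.map_cons, List.sum_cons, PySem.List.count_eq]
    ring

theorem keys_pvAcc (g : List (String × Int)) (d : PySem.Dict String Int) :
    (pvAcc g d).keys
      = g.foldl (fun ks p => (pvSplitB p.1).foldl (fun ks a => PySem.Set.add ks a) ks) d.keys := by
  induction g generalizing d with
  | nil => rfl
  | cons p t ih =>
    unfold pvAcc at *
    rw [List.foldl_cons, ih, keys_inner, List.foldl_cons]

-- under distinct keys, A's dict-valued lookup g[x] is the pair's own value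
theorem A_fold_eq_pvAcc (g : List (String × Int))
    (hnd : (g.map Prod.fst).Nodup) :
    g.foldl (fun ua p =>
      (pvSplitA p.1).foldl (fun ua a =>
        if ua.contains a then ua.insert a (ua.getD a 0 + (PySem.Dict.mk g).getD p.1 0)
        else ua.insert a ((PySem.Dict.mk g).getD p.1 0)) ua) PySem.Dict.empty
    = pvAcc g PySem.Dict.empty := by
  unfold pvAcc
  have hsp : pvSplitB = pvSplitA := rfl
  rw [hsp]
  apply PySem.List.foldl_congr_mem
  intro ua p hp
  have hkeys : (PySem.Dict.mk g).keys.Nodup := hnd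
  have hv : (PySem.Dict.mk g).getD p.1 0 = p.2 := by
    exact PySem.Dict.getD_of_mem_items _ (by simpa using hp) hkeys 0
  rw [hv, stepA_collapse p.2]

theorem dict_size_eq_keys_length (d : PySem.Dict String Int) : d.size = d.keys.length := by
  simp [PySem.Dict.size, PySem.Dict.keys]

-- ===== VERDICT (by name: the statement is the Claim_ definition above) =====
theorem get_unique_alleles_spec : Claim_equal_get_unique_alleles := by
  intro g _hdom hpre
  obtain ⟨hnd, hlen⟩ := hpre
  replace hlen : (PySem.Set.ofList (g.flatMap (fun p => pvSplitB p.1))).length = 2 := hlen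
  simp only [Spec_get_unique_alleles, get_unique_alleles, get_unique_alleles_alt]
  rw [A_fold_eq_pvAcc g hnd, alt_alleles_eq]
  set flat := g.flatMap (fun p => pvSplitB p.1) with hflat
  have hk : (pvAcc g PySem.Dict.empty).keys = PySem.Set.ofList flat := by
    rw [keys_pvAcc]
    have := alt_alleles_eq g
    rw [hflat]
    exact this
  obtain ⟨a1, a2, hset⟩ : ∃ a1 a2, PySem.Set.ofList flat = [a1, a2] := by
    rcases h : PySem.Set.ofList flat with _ | ⟨a1, _ | ⟨a2, _ | _⟩⟩ <;>
      simp_all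
  have hsize : (pvAcc g PySem.Dict.empty).size = 2 := by
    rw [dict_size_eq_keys_length, hk, hset]; rfl
  rw [hk, hset, hsize]
  have h1 : (pvAcc g PySem.Dict.empty).getD a1 0 = pvTotal g a1 := by
    rw [getD_pvAcc, pvTotal_eq_pvSum]; simp
  have h2 : (pvAcc g PySem.Dict.empty).getD a2 0 = pvTotal g a2 := by
    rw [getD_pvAcc, pvTotal_eq_pvSum]; simp
  simp [h1, h2, PySem.List.pyGetD]
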